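-- pv_equiv track=rewrite | github.com/chasehfinch-cpu/AIAuth | scripts/render_pilot_report.py | observations
-- ===== SOURCE A (Python) =====
-- def fmt(v): return f"{int(v or 0):,}"
--
-- def observations(data: dict) -> str:
--     s = data.get("summary") or {}
--     notes = []
--     if s.get("rubber_stamp_count"):
--         notes.append(f"Rubber-stamp alerts: {fmt(s['rubber_stamp_count'])} attestations had "
--                      f"&lt;10 seconds of review time on content &gt;500 characters.")
--     if s.get("shadow_ai_alerts"):
--         notes.append(f"Shadow AI: {fmt(s['shadow_ai_alerts'])} unique app(s) were running but not used "
--                      f"for attested work — potential ungoverned AI usage.")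
--     if s.get("ai_authored_detected"):
--         notes.append(f"AI-authored artifacts: {fmt(s['ai_authored_detected'])} files carried embedded "
--                      f"AI-authorship markers (Copilot docProps, C2PA, ChatGPT PDF, etc.).")
--     if s.get("external_exposure_count"):
--         notes.append(f"External content flow: {fmt(s['external_exposure_count'])} attested artifacts "
--                      f"flowed to external destinations (email, messaging, external docs).")
--     if s.get("chain_break_count"):
--         notes.append(f"Chain integrity: {fmt(s['chain_break_count'])} document chain(s) had a missing "
--                      f"parent receipt — either pre-AIAuth history or a cross-deployment transfer.")
--     if not notes:
--         notes.append("No material issues flagged during the pilot window.")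
--     return "<ul>" + "".join(f"<li>{n}</li>" for n in notes) + "</ul>"
-- ===== SOURCE B (Python) =====
-- def fmt(v): return f"{int(v or 0):,}"
--
-- _SPECS = (
--     ("rubber_stamp_count",
--      "Rubber-stamp alerts: ",
--      " attestations had &lt;10 seconds of review time on content &gt;500 characters."),
--     ("shadow_ai_alerts",
--      "Shadow AI: ",
--      " unique app(s) were running but not used for attested work — potential ungoverned AI usage."),
--     ("ai_authored_detected",
--      "AI-authored artifacts: ",
--      " files carried embedded AI-authorship markers (Copilot docProps, C2PA, ChatGPT PDF, etc.)."),
--     ("external_exposure_count",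
--      "External content flow: ",
--      " attested artifacts flowed to external destinations (email, messaging, external docs)."),
--     ("chain_break_count",
--      "Chain integrity: ",
--      " document chain(s) had a missing parent receipt — either pre-AIAuth history or a cross-deployment transfer."),
-- )
--
-- def observations(data: dict) -> str:
--     # Recursively renders the <li> items straight into one HTML string:
--     # no intermediate notes list, no join pass.
--     s = data.get("summary") or {}
--
--     def render(specs):
--         if not specs:
--             return ""
--         key, before, after = specs[0]
--         head = "<li>" + before + fmt(s[key]) + after + "</li>" if s.get(key) else ""
--         return head + render(specs[1:])
--
--     body = render(_SPECS)
--     if not body: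
--         body = "<li>No material issues flagged during the pilot window.</li>"
--     return "<ul>" + body + "</ul>"
-- ===== Notes on version B (the rewrite author's own statement) =====
-- stated objective: alternative
-- what changed: Replaces the five sequential truthiness-guarded appends to a notes list plus a final map/join pass by a recursive renderer over a spec table that emits each <li>...</li> fragment directly into the HTML string (fallback tested on the empty string, not an empty list); fmt and all message texts are identical.
import Mathlib
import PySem

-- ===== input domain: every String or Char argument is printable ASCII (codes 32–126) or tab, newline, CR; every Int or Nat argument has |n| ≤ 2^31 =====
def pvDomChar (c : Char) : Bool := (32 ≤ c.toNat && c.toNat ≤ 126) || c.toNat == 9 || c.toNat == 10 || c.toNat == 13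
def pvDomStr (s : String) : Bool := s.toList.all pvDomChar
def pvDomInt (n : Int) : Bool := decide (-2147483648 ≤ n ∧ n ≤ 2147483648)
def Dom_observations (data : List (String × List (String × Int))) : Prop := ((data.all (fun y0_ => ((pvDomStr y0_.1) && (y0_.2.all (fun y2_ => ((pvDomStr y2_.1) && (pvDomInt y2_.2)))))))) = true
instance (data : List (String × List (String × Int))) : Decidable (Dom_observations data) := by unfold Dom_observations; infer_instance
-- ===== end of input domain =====

-- B replaces A's five guarded appends to a notes list plus a map/join pass by a recursive
-- renderer over a spec table that emits each <li> fragment directly; objective: alternative, same cost.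


-- shared module helper fmt(v) = f"{int(v or 0):,}" (comma thousands grouping), used verbatim by A and B
-- fmtGroup works on the REVERSED digit list, inserting ',' after every 3 digits
def fmtGroup (ds : List Char) : List Char :=
  if ds.length ≤ 3 then ds
  else ds.take 3 ++ ',' :: fmtGroup (ds.drop 3)
  termination_by ds.length
  decreasing_by simp; omega

def fmt (v : Int) : String :=
  let n : Int := if v = 0 then 0 else v      -- int(v or 0)
  (if n < 0 then "-" else "") ++
    String.ofList (fmtGroup (PySem.Int.toChars n.natAbs).reverse).reverse

-- Python truthiness of s.get(key) for an int-valued dict: None and 0 are falsy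
def truthy : Option Int → Bool
  | none => false
  | some v => v != 0

-- ===== PORT A =====
def observations (data : List (String × List (String × Int))) : String :=
  let s : PySem.Dict String Int := PySem.Dict.mk ((PySem.Dict.mk data).get? "summary").toList.flatten  -- data.get("summary") or {}
  let notes : List String := []
  let notes := if truthy (s.get? "rubber_stamp_count") then
      notes ++ ["Rubber-stamp alerts: " ++ fmt ((s.get? "rubber_stamp_count").getD 0) ++
        " attestations had &lt;10 seconds of review time on content &gt;500 characters."] else notes
  let notes := if truthy (s.get? "shadow_ai_alerts") then
      notes ++ ["Shadow AI: " ++ fmt ((s.get? "shadow_ai_alerts").getD 0) ++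
        " unique app(s) were running but not used for attested work — potential ungoverned AI usage."] else notes
  let notes := if truthy (s.get? "ai_authored_detected") then
      notes ++ ["AI-authored artifacts: " ++ fmt ((s.get? "ai_authored_detected").getD 0) ++
        " files carried embedded AI-authorship markers (Copilot docProps, C2PA, ChatGPT PDF, etc.)."] else notes
  let notes := if truthy (s.get? "external_exposure_count") then
      notes ++ ["External content flow: " ++ fmt ((s.get? "external_exposure_count").getD 0) ++
        " attested artifacts flowed to external destinations (email, messaging, external docs)."] else notes
  let notes := if truthy (s.get? "chain_break_count") then
      notes ++ ["Chain integrity: " ++ fmt ((s.get? "chain_break_count").getD 0) ++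
        " document chain(s) had a missing parent receipt — either pre-AIAuth history or a cross-deployment transfer."] else notes
  let notes := if notes.isEmpty then notes ++ ["No material issues flagged during the pilot window."] else notes
  "<ul>" ++ String.join (notes.map (fun n => "<li>" ++ n ++ "</li>")) ++ "</ul>"

-- ===== PORT B =====
def obsSpecs : List (String × String × String) :=
  [("rubber_stamp_count", "Rubber-stamp alerts: ",
    " attestations had &lt;10 seconds of review time on content &gt;500 characters."),
   ("shadow_ai_alerts", "Shadow AI: ",
    " unique app(s) were running but not used for attested work — potential ungoverned AI usage."),
   ("ai_authored_detected", "AI-authored artifacts: ",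
    " files carried embedded AI-authorship markers (Copilot docProps, C2PA, ChatGPT PDF, etc.)."),
   ("external_exposure_count", "External content flow: ",
    " attested artifacts flowed to external destinations (email, messaging, external docs)."),
   ("chain_break_count", "Chain integrity: ",
    " document chain(s) had a missing parent receipt — either pre-AIAuth history or a cross-deployment transfer.")]

-- B's inner recursive render(specs): emits each <li>…</li> fragment directly into the HTML body
def obsRender (s : PySem.Dict String Int) : List (String × String × String) → String
  | [] => ""
  | (key, before, after) :: rest =>
      (if truthy (s.get? key) then "<li>" ++ before ++ fmt ((s.get? key).getD 0) ++ after ++ "</li>"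
       else "") ++ obsRender s rest

def observations_alt (data : List (String × List (String × Int))) : String :=
  let s : PySem.Dict String Int := PySem.Dict.mk ((PySem.Dict.mk data).get? "summary").toList.flatten
  let body := obsRender s obsSpecs
  let body := if body = "" then "<li>No material issues flagged during the pilot window.</li>" else body
  "<ul>" ++ body ++ "</ul>"

-- ===== PRECONDITION & SPEC =====
def Spec_observations (data : List (String × List (String × Int))) (out : String) : Prop := out = observations_alt data
instance (data : List (String × List (String × Int))) (out : String) : Decidable (Spec_observations data out) := by unfold Spec_observations; infer_instance

-- ===== CLAIM (what is proved, stated in full; the proofs are below) =====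
def Claim_equal_observations : Prop := ∀ (data : List (String × List (String × Int))), Dom_observations data → Spec_observations data (observations data)

-- ===== LEMMAS AND PROOFS =====

-- the note a spec contributes (some = present and truthy), used only by the proof
def noteOf (s : PySem.Dict String Int) (spec : String × String × String) : Option String :=
  if truthy (s.get? spec.1) then some (spec.2.1 ++ fmt ((s.get? spec.1).getD 0) ++ spec.2.2) else none

theorem strfoldl_shift (a : String) (l : List String) :
    List.foldl (fun r s => r ++ s) a l = a ++ List.foldl (fun r s => r ++ s) "" l := by
  induction l generalizing a with
  | nil => simp
  | cons h t ih => simp only [List.foldl]; rw [ih (a ++ h), ih ("" ++ h)]; simp [String.append_assoc]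

theorem join_cons (x : String) (xs : List String) :
    String.join (x :: xs) = x ++ String.join xs := by
  simp only [String.join, List.foldl]
  rw [strfoldl_shift ("" ++ x)]; simp

theorem obsRender_eq (s : PySem.Dict String Int) (l : List (String × String × String)) :
    obsRender s l = String.join ((l.filterMap (noteOf s)).map (fun n => "<li>" ++ n ++ "</li>")) := by
  induction l with
  | nil => simp [obsRender, String.join]
  | cons h t ih =>
      obtain ⟨k, b, a⟩ := h
      by_cases hg : truthy (s.get? k) <;>
        simp [obsRender, noteOf, hg, ih, join_cons, String.append_assoc]

theorem join_li_empty (l : List String) :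
    (String.join (l.map (fun n => "<li>" ++ n ++ "</li>")) = "") ↔ l = [] := by
  cases l with
  | nil => simp [String.join]
  | cons h t =>
      simp only [List.map, join_cons]
      constructor
      · intro he
        exfalso
        have := congrArg String.length he
        simp [String.length_append] at this
      · intro he; exact absurd he (by simp)

-- A's five guarded appends produce exactly the filterMap of noteOf over the spec table
theorem chain_eq (s : PySem.Dict String Int) :
    (let notes : List String := []
     let notes := if truthy (s.get? "rubber_stamp_count") then
         notes ++ ["Rubber-stamp alerts: " ++ fmt ((s.get? "rubber_stamp_count").getD 0) ++
           " attestations had &lt;10 seconds of review time on content &gt;500 characters."] else notes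
     let notes := if truthy (s.get? "shadow_ai_alerts") then
         notes ++ ["Shadow AI: " ++ fmt ((s.get? "shadow_ai_alerts").getD 0) ++
           " unique app(s) were running but not used for attested work — potential ungoverned AI usage."] else notes
     let notes := if truthy (s.get? "ai_authored_detected") then
         notes ++ ["AI-authored artifacts: " ++ fmt ((s.get? "ai_authored_detected").getD 0) ++
           " files carried embedded AI-authorship markers (Copilot docProps, C2PA, ChatGPT PDF, etc.)."] else notes
     let notes := if truthy (s.get? "external_exposure_count") then
         notes ++ ["External content flow: " ++ fmt ((s.get? "external_exposure_count").getD 0) ++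
           " attested artifacts flowed to external destinations (email, messaging, external docs)."] else notes
     let notes := if truthy (s.get? "chain_break_count") then
         notes ++ ["Chain integrity: " ++ fmt ((s.get? "chain_break_count").getD 0) ++
           " document chain(s) had a missing parent receipt — either pre-AIAuth history or a cross-deployment transfer."] else notes
     notes) = obsSpecs.filterMap (noteOf s) := by
  by_cases h1 : truthy (s.get? "rubber_stamp_count") <;>
  by_cases h2 : truthy (s.get? "shadow_ai_alerts") <;>
  by_cases h3 : truthy (s.get? "ai_authored_detected") <;>
  by_cases h4 : truthy (s.get? "external_exposure_count") <;>
  by_cases h5 : truthy (s.get? "chain_break_count") <;>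
    simp [obsSpecs, noteOf, h1, h2, h3, h4, h5, List.filterMap]

-- ===== VERDICT (by name: the statement is the Claim_ definition above) =====
theorem observations_spec : Claim_equal_observations := by
  intro data _
  unfold Spec_observations observations observations_alt
  simp only [chain_eq, obsRender_eq]
  set nl := obsSpecs.filterMap (noteOf (PySem.Dict.mk ((PySem.Dict.mk data).get? "summary").toList.flatten)) with hnl
  by_cases hE : nl = []
  · simp [hE, String.join]
  · have hB : String.join (nl.map (fun n => "<li>" ++ n ++ "</li>")) ≠ "" := by
      intro h; exact hE ((join_li_empty nl).mp h)
    simp [hE, hB, List.isEmpty_iff]
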